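-- pv_equiv track=rewrite | github.com/lissity/AoC | 2015/Day5/main.py | check_disallowed_combination
-- ===== SOURCE A (Python) =====
-- def check_disallowed_combination(string):
--     disallowed = ['ab', 'cd', 'pq', 'xy']
--     index = 0
--     disallowed_ok = True
--     for char in range(0, len(string)-1):
--         next_char = string[char+1]
--         combo = string[char] + next_char
--         if combo in disallowed:
--             disallowed_ok = False
--             break
--         index += 1
--     return disallowed_ok
-- ===== SOURCE B (Python) =====
-- def check_disallowed_combination(string):
--     disallowed = ['ab', 'cd', 'pq', 'xy']
--     return not any(d in string for d in disallowed)
-- ===== Notes on version B (the rewrite author's own statement) =====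
-- stated objective: simpler
-- what changed: B loops over the four disallowed patterns and uses substring search (d in string) instead of A's Python-level index loop that builds every adjacent character pair and tests list membership with a break.
import Mathlib
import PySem

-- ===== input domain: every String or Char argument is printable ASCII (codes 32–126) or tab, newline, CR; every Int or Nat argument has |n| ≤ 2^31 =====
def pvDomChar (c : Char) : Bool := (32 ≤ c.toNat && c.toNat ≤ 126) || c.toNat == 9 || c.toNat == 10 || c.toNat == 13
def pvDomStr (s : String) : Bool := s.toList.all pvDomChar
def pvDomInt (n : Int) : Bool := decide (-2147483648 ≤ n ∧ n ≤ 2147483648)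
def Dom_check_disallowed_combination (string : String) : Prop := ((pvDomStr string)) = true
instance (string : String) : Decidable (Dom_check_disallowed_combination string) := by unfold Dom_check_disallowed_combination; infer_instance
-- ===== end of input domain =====

-- B iterates over the four disallowed patterns with substring search instead of A's
-- index loop over adjacent pairs; objective: simpler.

-- ===== PORT A =====
-- the loop 'for char in range(0, len(string)-1)' with break; the two-char combo string
-- is represented by its character list (exact: equality of 2-char strings = equality of
-- their char lists); indices char and char+1 are always in range, so pyGetD's default
-- is never used.
def pvALoop (s : List Char) : List Int → Bool
  | [] => true
  | i :: rest =>
      let next_char := PySem.List.pyGetD s (i + 1) ' '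
      let combo := [PySem.List.pyGetD s i ' ', next_char]
      if combo ∈ [['a','b'], ['c','d'], ['p','q'], ['x','y']] then false
      else pvALoop s rest

def check_disallowed_combination (string : String) : Bool :=
  let s := string.toList
  pvALoop s (PySem.List.pyRange 0 ((s.length : Int) - 1) 1)

-- ===== PORT B =====
def check_disallowed_combination_alt (string : String) : Bool :=
  !(["ab", "cd", "pq", "xy"].any (fun d => PySem.Str.isIn d string))

-- ===== PRECONDITION & SPEC =====
def Spec_check_disallowed_combination (string : String) (out : Bool) : Prop := out = check_disallowed_combination_alt string
instance (string : String) (out : Bool) : Decidable (Spec_check_disallowed_combination string out) := by unfold Spec_check_disallowed_combination; infer_instance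

-- ===== CLAIM (what is proved, stated in full; the proofs are below) =====
def Claim_equal_check_disallowed_combination : Prop := ∀ (string : String), Dom_check_disallowed_combination string → Spec_check_disallowed_combination string (check_disallowed_combination string)

-- ===== LEMMAS AND PROOFS =====

-- a 2-element list is an infix iff its two characters occur at adjacent positions
theorem pv_infix_pair {x y : Char} : ∀ (s : List Char),
    [x, y] <:+: s ↔ ∃ j : Nat, s[j]? = some x ∧ s[j + 1]? = some y := by
  intro s
  induction s with
  | nil => simp
  | cons a t ih =>
    rw [List.infix_cons_iff, ih]
    constructor
    · rintro (hp | ⟨j, h1, h2⟩)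
      · rcases hp with ⟨u, hu⟩
        refine ⟨0, ?_, ?_⟩ <;> simp [← hu]
      · exact ⟨j + 1, by simpa using h1, by simpa using h2⟩
    · rintro ⟨j, h1, h2⟩
      cases j with
      | zero =>
        left
        cases t with
        | nil => simp at h2
        | cons b u =>
          simp at h1 h2
          exact ⟨u, by simp [h1, h2]⟩
      | succ k =>
        right
        exact ⟨k, by simpa using h1, by simpa using h2⟩

theorem pv_aloop_true (s : List Char) : ∀ (idxs : List Int),
    pvALoop s idxs = true ↔
      ∀ i ∈ idxs,
        [PySem.List.pyGetD s i ' ', PySem.List.pyGetD s (i + 1) ' ']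
          ∉ [['a','b'], ['c','d'], ['p','q'], ['x','y']] := by
  intro idxs
  induction idxs with
  | nil => simp [pvALoop]
  | cons i rest ih =>
    simp only [pvALoop]
    split_ifs with h
    · constructor
      · intro hf; simp at hf
      · intro hall; exact absurd h (hall i (List.mem_cons_self ..))
    · rw [ih]
      constructor
      · intro hall j hj
        rcases List.mem_cons.mp hj with rfl | hj
        · exact h
        · exact hall j hj
      · intro hall j hj
        exact hall j (List.mem_cons_of_mem _ hj)

-- if A's loop over all adjacent positions found nothing, no disallowed pair is an infix
theorem pv_no_pair (s : List Char) (x y : Char)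
    (hA : ∀ i ∈ PySem.List.pyRange 0 ((s.length : Int) - 1) 1,
        [PySem.List.pyGetD s i ' ', PySem.List.pyGetD s (i + 1) ' ']
          ∉ [['a','b'], ['c','d'], ['p','q'], ['x','y']])
    (hxy : [x, y] ∈ [['a','b'], ['c','d'], ['p','q'], ['x','y']]) :
    ¬ [x, y] <:+: s := by
  intro hinf
  rcases (pv_infix_pair s).mp hinf with ⟨j, h1, h2⟩
  have hj1 : j + 1 < s.length := (List.getElem?_eq_some_iff.mp h2).1
  have hmem : (j : Int) ∈ PySem.List.pyRange 0 ((s.length : Int) - 1) 1 := by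
    rw [PySem.List.mem_pyRange_one]; omega
  apply hA _ hmem
  have e1 : PySem.List.pyGetD s (j : Int) ' ' = x := by
    rw [PySem.List.pyGetD_natCast, List.getD_eq_getElem?_getD, h1]; rfl
  have e2 : PySem.List.pyGetD s ((j : Int) + 1) ' ' = y := by
    have hc : ((j : Int) + 1) = ((j + 1 : Nat) : Int) := by push_cast; ring
    rw [hc, PySem.List.pyGetD_natCast, List.getD_eq_getElem?_getD, h2]; rfl
  rw [e1, e2]; exact hxy

theorem check_disallowed_combination_spec : Claim_equal_check_disallowed_combination := by
  intro string _
  unfold Spec_check_disallowed_combination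
  rw [Bool.eq_iff_iff]
  unfold check_disallowed_combination check_disallowed_combination_alt
  set s := string.toList with hs
  rw [pv_aloop_true]
  simp only [Bool.not_eq_true', List.any_eq_false, PySem.Str.isIn_eq]
  constructor
  · intro hA d hd hinf
    rw [← hs] at hinf
    fin_cases hd
    · exact pv_no_pair s 'a' 'b' hA (by simp)
        ((PySem.Chars.isIn_iff_infix ..).mp (by simpa using hinf))
    · exact pv_no_pair s 'c' 'd' hA (by simp)
        ((PySem.Chars.isIn_iff_infix ..).mp (by simpa using hinf))
    · exact pv_no_pair s 'p' 'q' hA (by simp)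
        ((PySem.Chars.isIn_iff_infix ..).mp (by simpa using hinf))
    · exact pv_no_pair s 'x' 'y' hA (by simp)
        ((PySem.Chars.isIn_iff_infix ..).mp (by simpa using hinf))
  · intro hB i hi hbad
    rw [PySem.List.mem_pyRange_one] at hi
    obtain ⟨j, rfl⟩ : ∃ j : Nat, i = (j : Int) := ⟨i.toNat, (Int.toNat_of_nonneg hi.1).symm⟩
    have hj1 : j + 1 < s.length := by omega
    have e1 : PySem.List.pyGetD s (j : Int) ' ' = s[j]'(by omega) := by
      rw [PySem.List.pyGetD_natCast, List.getD_eq_getElem?_getD,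
        List.getElem?_eq_getElem (by omega)]; rfl
    have e2 : PySem.List.pyGetD s ((j : Int) + 1) ' ' = s[j + 1]'hj1 := by
      have hc : ((j : Int) + 1) = ((j + 1 : Nat) : Int) := by push_cast; ring
      rw [hc, PySem.List.pyGetD_natCast, List.getD_eq_getElem?_getD,
        List.getElem?_eq_getElem hj1]; rfl
    rw [e1, e2] at hbad
    have hinf : [s[j]'(by omega), s[j + 1]'hj1] <:+: s :=
      (pv_infix_pair s).mpr ⟨j, List.getElem?_eq_getElem _, List.getElem?_eq_getElem _⟩
    simp only [List.mem_cons, List.cons.injEq, and_true,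
      List.not_mem_nil, or_false] at hbad
    rcases hbad with ⟨e3, e4⟩ | ⟨e3, e4⟩ | ⟨e3, e4⟩ | ⟨e3, e4⟩ <;> rw [e3, e4] at hinf
    · exact hB "ab" (by simp) (by rw [PySem.Chars.isIn_iff_infix]; simpa using hinf)
    · exact hB "cd" (by simp) (by rw [PySem.Chars.isIn_iff_infix]; simpa using hinf)
    · exact hB "pq" (by simp) (by rw [PySem.Chars.isIn_iff_infix]; simpa using hinf)
    · exact hB "xy" (by simp) (by rw [PySem.Chars.isIn_iff_infix]; simpa using hinf)
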